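-- pv_equiv track=rewrite | github.com/YuanzheChen/MOOC-Learner-Curated | connectors/new-MITx-files2vismooc-files.py | concat_dicts
-- ===== SOURCE A (Python) =====
-- def all_disjoint(sets):
--     union = set()
--     for s in sets:
--         for x in s:
--             if x in union:
--                 return False
--             union.add(x)
--     return True
--
-- def concat_dict(list_of_dict):
--     if not all(isinstance(d, dict) for d in list_of_dict):
--         raise ValueError("Invalid list_of_dict")
--     if not all_disjoint([set(d.keys()) for d in list_of_dict]):
--         raise ValueError("Illegal concatenation of list_of_dict")
--     sd = {}
--     for d in list_of_dict:
--         sd.update(d)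
--     return sd
--
-- def concat_dicts(list_of_dicts):
--     if not list_of_dicts:
--         return []
--     if not all(len(dicts) == len(list_of_dicts[0])
--                for dicts in list_of_dicts):
--         raise ValueError("Illegal concatenation of list_of_dicts")
--     return [concat_dict([list_of_dicts[x][y]
--                          for x in range(len(list_of_dicts))])
--             for y in range(len(list_of_dicts[0]))]
-- ===== SOURCE B (Python) =====
-- def concat_dicts(list_of_dicts):
--     if not list_of_dicts:
--         return []
--     n = len(list_of_dicts[0])
--     merged = [{} for _ in range(n)]
--     for row in list_of_dicts:
--         if len(row) != n:
--             raise ValueError("Illegal concatenation of list_of_dicts")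
--         for acc, d in zip(merged, row):
--             if not isinstance(d, dict):
--                 raise ValueError("Invalid list_of_dict")
--             for key, value in d.items():
--                 if key in acc:
--                     raise ValueError("Illegal concatenation of list_of_dict")
--                 acc[key] = value
--     return merged
-- ===== Notes on version B (the rewrite author's own statement) =====
-- stated objective: alternative
-- what changed: B replaces A's two-stage column processing (index-range column extraction, then all_disjoint's set scan over the column's key sets, then a separate dict-update merge loop) by one row-major pass: per-column accumulator dicts are built up row by row, each key inserted individually with a membership check that raises on collision, so no columns, key sets or separate disjointness stage are ever materialised.
import Mathlib
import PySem

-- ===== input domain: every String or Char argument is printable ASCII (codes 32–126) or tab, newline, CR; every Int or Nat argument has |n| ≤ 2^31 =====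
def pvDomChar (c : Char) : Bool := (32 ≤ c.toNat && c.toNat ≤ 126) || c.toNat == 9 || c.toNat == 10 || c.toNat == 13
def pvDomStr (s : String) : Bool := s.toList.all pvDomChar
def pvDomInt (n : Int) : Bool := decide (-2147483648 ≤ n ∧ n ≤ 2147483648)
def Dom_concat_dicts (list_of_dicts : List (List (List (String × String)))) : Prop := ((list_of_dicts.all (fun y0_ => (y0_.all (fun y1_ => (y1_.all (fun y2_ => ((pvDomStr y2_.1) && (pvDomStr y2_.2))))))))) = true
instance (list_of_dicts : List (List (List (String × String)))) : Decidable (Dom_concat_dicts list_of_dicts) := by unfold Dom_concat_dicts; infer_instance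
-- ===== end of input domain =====

-- B replaces A's two-stage per-column processing (index-range column extraction, all_disjoint's
-- set scan over the key sets, then a separate dict-update merge loop) by ONE row-major pass:
-- per-column accumulator dicts built row by row, each key inserted individually with a
-- membership check that raises on collision; objective: alternative (same cost, no columns or
-- key sets materialised).

-- ===== PORT A =====
-- the inner 'for x in s' loop of all_disjoint: none = the early 'return False'
def pvScan (union : PySem.Set String) : List String → Option (PySem.Set String)
  | [] => some union
  | x :: rest =>
    if PySem.Set.contains union x then none
    else pvScan (PySem.Set.add union x) rest

def pvAllDisjoint (union : PySem.Set String) : List (List String) → Bool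
  | [] => true
  | s :: rest =>
    match pvScan union s with
    | none => false
    | some u => pvAllDisjoint u rest

-- concat_dict; the isinstance(d, dict) check is always true under the Lean typing
def pvConcatDict (list_of_dict : List (List (String × String))) : List (String × String) :=
  if pvAllDisjoint PySem.Set.empty
      (list_of_dict.map (fun d => PySem.Set.ofList (PySem.Dict.keys (PySem.Dict.ofList d)))) then
    (list_of_dict.foldl (fun sd d => PySem.Dict.update sd d) PySem.Dict.empty).items
  else []  -- Python raises ValueError("Illegal concatenation of list_of_dict"); outside Pre_

def concat_dicts (list_of_dicts : List (List (List (String × String)))) : List (List (String × String)) :=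
  if list_of_dicts.isEmpty then []
  else if !(list_of_dicts.all (fun dicts => dicts.length == (list_of_dicts.headD []).length)) then
    []  -- Python raises ValueError("Illegal concatenation of list_of_dicts"); outside Pre_
  else
    (PySem.List.pyRange 0 ((list_of_dicts.headD []).length : Int) 1).map (fun y =>
      pvConcatDict ((PySem.List.pyRange 0 (list_of_dicts.length : Int) 1).map (fun x =>
        PySem.List.pyGetD (PySem.List.pyGetD list_of_dicts x []) y [])))

-- ===== PORT B =====
-- 'for key, value in d.items(): if key in acc: raise …; acc[key] = value'; none = the ValueError
def pvInsertAll (acc : PySem.Dict String String) : List (String × String) → Option (PySem.Dict String String)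
  | [] => some acc
  | (k, v) :: rest =>
    if acc.contains k then none
    else pvInsertAll (acc.insert k v) rest

-- 'for acc, d in zip(merged, row)' (zip truncates; the isinstance check is always true under the Lean typing)
def pvMergeRow : List (PySem.Dict String String) → List (List (String × String)) → Option (List (PySem.Dict String String))
  | [], _ => some []
  | accs, [] => some accs
  | a :: accs, d :: ds =>
    match pvInsertAll a (PySem.Dict.ofList d).items with
    | none => none
    | some a' =>
      match pvMergeRow accs ds with
      | none => none
      | some accs' => some (a' :: accs')

-- 'for row in list_of_dicts: …'
def pvGo (n : Nat) : List (PySem.Dict String String) → List (List (List (String × String))) → Option (List (PySem.Dict String String))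
  | acc, [] => some acc
  | acc, row :: rest =>
    if row.length ≠ n then none  -- Python raises ValueError("Illegal concatenation of list_of_dicts"); outside Pre_
    else match pvMergeRow acc row with
      | none => none  -- Python raises ValueError("Illegal concatenation of list_of_dict"); outside Pre_
      | some acc' => pvGo n acc' rest

def concat_dicts_alt (list_of_dicts : List (List (List (String × String)))) : List (List (String × String)) :=
  if list_of_dicts.isEmpty then []
  else
    match pvGo (list_of_dicts.headD []).length
        (List.replicate (list_of_dicts.headD []).length PySem.Dict.empty) list_of_dicts with
    | none => []  -- a ValueError path; outside Pre_
    | some merged => merged.map PySem.Dict.items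

-- ===== PRECONDITION & SPEC =====
-- Pre_ is exactly the inputs on which the Python A returns (no ValueError): every row has the
-- first row's length and, in every column, the distinct-key sets of the dicts are pairwise disjoint.
def Pre_concat_dicts (list_of_dicts : List (List (List (String × String)))) : Prop :=
  (∀ row ∈ list_of_dicts, row.length = (list_of_dicts.headD []).length) ∧
  (∀ y < (list_of_dicts.headD []).length,
    (list_of_dicts.flatMap (fun row => PySem.List.dedup ((row.getD y []).map Prod.fst))).Nodup)

instance (list_of_dicts : List (List (List (String × String)))) : Decidable (Pre_concat_dicts list_of_dicts) := by
  unfold Pre_concat_dicts; infer_instance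

def pvWitness_concat_dicts : (List (List (List (String × String)))) :=
  [[[("a", "1")], [("b", "2"), ("c", "3")]], [[("d", "4")], [("e", "5")]]]

def Spec_concat_dicts (list_of_dicts : List (List (List (String × String)))) (out : List (List (String × String))) : Prop := out = concat_dicts_alt list_of_dicts
instance (list_of_dicts : List (List (List (String × String)))) (out : List (List (String × String))) : Decidable (Spec_concat_dicts list_of_dicts out) := by unfold Spec_concat_dicts; infer_instance

-- ===== CLAIM (what is proved, stated in full; the proofs are below) =====
def Claim_equal_concat_dicts : Prop := ∀ (list_of_dicts : List (List (List (String × String)))), Dom_concat_dicts list_of_dicts → Pre_concat_dicts list_of_dicts → Spec_concat_dicts list_of_dicts (concat_dicts list_of_dicts)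

-- ===== LEMMAS AND PROOFS =====

-- the single merge step B performs on one column accumulator (insert all items of one dict)
def pvMergeStep (sd : PySem.Dict String String) (d : List (String × String)) : PySem.Dict String String :=
  (PySem.Dict.ofList d).items.foldl (fun s p => s.insert p.1 p.2) sd

-- ---- A-side lemmas (unchanged reading of A) ----
theorem pv_scan_some (s : List String) (u : PySem.Set String) (hs : s.Nodup)
    (hd : ∀ x ∈ s, x ∉ u) : pvScan u s = some (u ++ s) := by
  induction s generalizing u with
  | nil => simp [pvScan]
  | cons x rest ih =>
    have hxu : x ∉ u := hd x (by simp)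
    have hc : PySem.Set.contains u x = false := by
      simp [PySem.Set.contains_eq_listContains, hxu]
    have hadd : PySem.Set.add u x = u ++ [x] := by
      simp [PySem.Set.add, PySem.Set.contains_eq_listContains, hxu]
    rw [pvScan, hc]
    simp only [Bool.false_eq_true, if_false, hadd]
    rw [ih (u ++ [x]) hs.of_cons]
    · simp
    · intro y hy
      simp only [List.mem_append, List.mem_singleton]
      rintro (h | rfl)
      · exact hd y (by simp [hy]) h
      · exact (List.nodup_cons.mp hs).1 hy

theorem pv_allDisjoint_true (sets : List (List String)) (u : PySem.Set String)
    (h : (u ++ sets.flatten).Nodup) : pvAllDisjoint u sets = true := by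
  induction sets generalizing u with
  | nil => simp [pvAllDisjoint]
  | cons s rest ih =>
    simp only [List.flatten_cons, ← List.append_assoc] at h
    rw [List.nodup_append] at h
    obtain ⟨hus, hrest, hdisj⟩ := h
    rw [List.nodup_append] at hus
    rw [pvAllDisjoint, pv_scan_some s u hus.2.1 (fun x hx hxu => hus.2.2 x hxu x hx rfl)]
    apply ih
    rw [List.nodup_append]
    exact ⟨List.nodup_append.mpr hus, hrest, hdisj⟩

theorem pv_keys_update (d : PySem.Dict String String) (l : List (String × String)) :
    (PySem.Dict.update d l).keys = PySem.Set.update d.keys (l.map Prod.fst) :=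
  PySem.Dict.keys_foldl_insert_key l Prod.fst (fun _ p => p.2) d

theorem pv_ofList_keys (d : List (String × String)) :
    (PySem.Dict.ofList d).keys = PySem.Set.ofList (d.map Prod.fst) := by
  rw [show PySem.Dict.ofList d = PySem.Dict.update PySem.Dict.empty d from rfl, pv_keys_update]
  rfl

theorem pv_column_a (column : List (List (String × String)))
    (h : (column.flatMap (fun d => PySem.Set.ofList (d.map Prod.fst))).Nodup) :
    pvConcatDict column = (column.foldl (fun sd d => PySem.Dict.update sd d) PySem.Dict.empty).items := by
  unfold pvConcatDict
  have hmap : column.map (fun d => PySem.Set.ofList (PySem.Dict.keys (PySem.Dict.ofList d)))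
      = column.map (fun d => PySem.Set.ofList (d.map Prod.fst)) := by
    apply List.map_congr_left
    intro d _
    rw [pv_ofList_keys, PySem.Set.ofList_eq_self_of_nodup _ (PySem.Set.nodup_ofList _)]
  rw [hmap, pv_allDisjoint_true _ PySem.Set.empty (by simpa [List.flatMap_def] using h)]
  simp

-- ---- B-side lemmas ----

-- inserting pairs whose keys are all fresh for sd leaves sd.items as a prefix:
-- step: an insert at a key sd does not contain acts only on the t part of mk (sd.items ++ t.items)
theorem pv_insert_mk_append (sd t : PySem.Dict String String) (k : String) (v : String)
    (h : sd.contains k = false) :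
    (PySem.Dict.mk (sd.items ++ t.items)).insert k v = PySem.Dict.mk (sd.items ++ (t.insert k v).items) := by
  have hsd : sd.items.any (fun p => p.1 == k) = false := by
    have : (PySem.Dict.mk sd.items).contains k = false := h
    simpa [PySem.Dict.contains_mk] using this
  have hmap : sd.items.map (fun p => if p.1 == k then (k, v) else p) = sd.items := by
    conv_rhs => rw [← List.map_id sd.items]
    apply List.map_congr_left
    intro p hp
    have : (p.1 == k) = false := by
      rw [List.any_eq_false] at hsd
      simpa using hsd p hp
    simp [this]
  apply PySem.Dict.ext
  by_cases hc : t.contains k = true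
  · have hc' : (PySem.Dict.mk (sd.items ++ t.items)).contains k = true := by
      have : (PySem.Dict.mk t.items).contains k = true := hc
      simp only [PySem.Dict.contains_mk] at this ⊢
      simp [this]
    rw [show ((PySem.Dict.mk (sd.items ++ t.items)).insert k v).items
          = if (PySem.Dict.mk (sd.items ++ t.items)).contains k then
              (PySem.Dict.mk (sd.items ++ t.items)).items.map (fun p => if p.1 == k then (k, v) else p)
            else (PySem.Dict.mk (sd.items ++ t.items)).items ++ [(k, v)] from PySem.Dict.items_insert _ k v,
        hc', PySem.Dict.items_insert_of_contains t hc (v := v)]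
    simp only [if_true]
    show (sd.items ++ t.items).map _ = sd.items ++ t.items.map _
    rw [List.map_append, hmap]
  · have hcf : t.contains k = false := by simpa using hc
    have hc' : (PySem.Dict.mk (sd.items ++ t.items)).contains k = false := by
      have : (PySem.Dict.mk t.items).contains k = false := hcf
      simp only [PySem.Dict.contains_mk] at this ⊢
      simp [this, hsd]
    rw [show ((PySem.Dict.mk (sd.items ++ t.items)).insert k v).items
          = if (PySem.Dict.mk (sd.items ++ t.items)).contains k then
              (PySem.Dict.mk (sd.items ++ t.items)).items.map (fun p => if p.1 == k then (k, v) else p)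
            else (PySem.Dict.mk (sd.items ++ t.items)).items ++ [(k, v)] from PySem.Dict.items_insert _ k v,
        hc', PySem.Dict.items_insert_of_not_contains t hcf (v := v)]
    show (sd.items ++ t.items) ++ [(k, v)] = sd.items ++ (t.items ++ [(k, v)])
    rw [List.append_assoc]

-- a fold of single inserts over pairs with keys fresh for sd = sd.items followed by the fold from empty
theorem pv_foldl_insert_append (d : List (String × String)) (sd t : PySem.Dict String String)
    (h : ∀ p ∈ d, sd.contains p.1 = false) :
    d.foldl (fun s p => s.insert p.1 p.2) (PySem.Dict.mk (sd.items ++ t.items))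
      = PySem.Dict.mk (sd.items ++ (d.foldl (fun s p => s.insert p.1 p.2) t).items) := by
  induction d generalizing t with
  | nil => rfl
  | cons p rest ih =>
    simp only [List.foldl_cons]
    rw [pv_insert_mk_append sd t p.1 p.2 (h p (by simp))]
    exact ih (t.insert p.1 p.2) (fun q hq => h q (by simp [hq]))

theorem pv_update_items_append (sd : PySem.Dict String String) (d : List (String × String))
    (h : ∀ p ∈ d, sd.contains p.1 = false) :
    (PySem.Dict.update sd d).items = sd.items ++ (PySem.Dict.ofList d).items := by
  have h2 := pv_foldl_insert_append d sd PySem.Dict.empty h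
  have hmk : PySem.Dict.mk (sd.items ++ (PySem.Dict.empty : PySem.Dict String String).items) = sd := by
    show PySem.Dict.mk (sd.items ++ []) = sd
    rw [List.append_nil]
  rw [hmk] at h2
  show (d.foldl (fun s p => s.insert p.1 p.2) sd).items = _
  rw [h2]
  rfl

theorem pv_mergeStep_items_append (sd : PySem.Dict String String) (d : List (String × String))
    (h : ∀ p ∈ d, sd.contains p.1 = false) :
    (pvMergeStep sd d).items = sd.items ++ (PySem.Dict.ofList d).items := by
  have hfresh : ∀ p ∈ (PySem.Dict.ofList d).items, sd.contains p.1 = false := by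
    intro p hp
    have hk : p.1 ∈ (PySem.Dict.ofList d).keys := PySem.Dict.mem_keys_of_mem_items _ hp
    rw [pv_ofList_keys, PySem.Set.mem_ofList, List.mem_map] at hk
    obtain ⟨q, hq, hqe⟩ := hk
    exact hqe ▸ h q hq
  have hnd : ((PySem.Dict.ofList d).items.map Prod.fst).Nodup := by
    have := PySem.Dict.nodup_keys_ofList (ps := d) (κ := String) (ν := String)
    simpa [PySem.Dict.keys] using this
  have := PySem.Dict.items_foldl_insert_fresh (l := (PySem.Dict.ofList d).items)
      (k := Prod.fst) (v := Prod.snd) (d := sd) hfresh hnd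
  unfold pvMergeStep
  simpa using this

-- hence A's per-dict update step and B's per-item insert step agree on fresh keys
theorem pv_step_eq (sd : PySem.Dict String String) (d : List (String × String))
    (h : ∀ p ∈ d, sd.contains p.1 = false) :
    PySem.Dict.update sd d = pvMergeStep sd d := by
  apply PySem.Dict.ext
  rw [pv_update_items_append sd d h, pv_mergeStep_items_append sd d h]

theorem pv_fresh_of_nodup (sd : PySem.Dict String String) (d : List (String × String))
    (h : (sd.keys ++ PySem.Set.ofList (d.map Prod.fst)).Nodup) :
    ∀ p ∈ d, sd.contains p.1 = false := by
  intro p hp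
  have hmem : p.1 ∈ PySem.Set.ofList (d.map Prod.fst) := by
    rw [PySem.Set.mem_ofList]
    exact List.mem_map_of_mem hp
  rw [List.nodup_append] at h
  have hnk : p.1 ∉ sd.keys := fun hk => h.2.2 p.1 hk p.1 hmem rfl
  rw [PySem.Dict.contains_eq_decide_mem_keys]
  simp [hnk]

theorem pv_mergeStep_keys (sd : PySem.Dict String String) (d : List (String × String))
    (h : (sd.keys ++ PySem.Set.ofList (d.map Prod.fst)).Nodup) :
    (pvMergeStep sd d).keys = sd.keys ++ PySem.Set.ofList (d.map Prod.fst) := by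
  have hf := pv_fresh_of_nodup sd d h
  have hi := pv_mergeStep_items_append sd d hf
  have : (pvMergeStep sd d).keys = (pvMergeStep sd d).items.map Prod.fst := by
    simp [PySem.Dict.keys]
  rw [this, hi, List.map_append, ← pv_ofList_keys]
  simp [PySem.Dict.keys]

-- A's column fold of updates = B's column fold of per-item inserts, on a disjoint column
theorem pv_colfold (column : List (List (String × String))) (sd : PySem.Dict String String)
    (h : (sd.keys ++ column.flatMap (fun d => PySem.Set.ofList (d.map Prod.fst))).Nodup) :
    column.foldl (fun s d => PySem.Dict.update s d) sd = column.foldl pvMergeStep sd := by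
  induction column generalizing sd with
  | nil => rfl
  | cons d rest ih =>
    simp only [List.flatMap_cons, ← List.append_assoc] at h
    have h1 : (sd.keys ++ PySem.Set.ofList (d.map Prod.fst)).Nodup := by
      rw [List.nodup_append] at h ⊢
      obtain ⟨ha, hb, hc⟩ := h
      rw [List.nodup_append] at ha
      exact ha
    have hstep := pv_step_eq sd d (pv_fresh_of_nodup sd d h1)
    simp only [List.foldl_cons, hstep]
    apply ih
    rw [pv_mergeStep_keys sd d h1]
    exact h

-- pvInsertAll succeeds iff the keys are fresh and distinct, returning the plain insert fold
theorem pv_insertAll_fresh (items : List (String × String)) (acc : PySem.Dict String String)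
    (hnd : (items.map Prod.fst).Nodup)
    (h : ∀ p ∈ items, acc.contains p.1 = false) :
    pvInsertAll acc items = some (items.foldl (fun s p => s.insert p.1 p.2) acc) := by
  induction items generalizing acc with
  | nil => rfl
  | cons p rest ih =>
    obtain ⟨k, v⟩ := p
    rw [pvInsertAll, h (k, v) (by simp)]
    simp only [Bool.false_eq_true, if_false, List.foldl_cons]
    apply ih _ (by simpa using hnd.of_cons)
    intro q hq
    rw [PySem.Dict.contains_insert]
    have hqk : (q.1 == k) = false := by
      simp only [List.map_cons, List.nodup_cons] at hnd
      have : q.1 ∈ rest.map Prod.fst := List.mem_map_of_mem hq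
      simp only [beq_eq_false_iff_ne, ne_eq]
      exact fun he => hnd.1 (he ▸ this)
    rw [hqk, h q (by simp [hq])]
    rfl

-- pvMergeRow on equal-length lists with fresh columns = zipWith of the merge step
theorem pv_mergeRow_eq (accs : List (PySem.Dict String String)) (row : List (List (String × String)))
    (hlen : accs.length = row.length)
    (h : ∀ (i : Nat) (a : PySem.Dict String String) (d : List (String × String)), accs[i]? = some a → row[i]? = some d → ∀ p ∈ d, a.contains p.1 = false) :
    pvMergeRow accs row = some (List.zipWith pvMergeStep accs row) := by
  induction accs generalizing row with
  | nil =>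
    cases row with
    | nil => rfl
    | cons d ds => simp at hlen
  | cons a as ih =>
    cases row with
    | nil => simp at hlen
    | cons d ds =>
      have hfresh : ∀ p ∈ (PySem.Dict.ofList d).items, a.contains p.1 = false := by
        intro p hp
        have hk : p.1 ∈ (PySem.Dict.ofList d).keys := PySem.Dict.mem_keys_of_mem_items _ hp
        rw [pv_ofList_keys, PySem.Set.mem_ofList, List.mem_map] at hk
        obtain ⟨q, hq, hqe⟩ := hk
        exact hqe ▸ h 0 a d rfl rfl q hq
      have hnd : ((PySem.Dict.ofList d).items.map Prod.fst).Nodup := by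
        have := PySem.Dict.nodup_keys_ofList (ps := d) (κ := String) (ν := String)
        simpa [PySem.Dict.keys] using this
      rw [pvMergeRow, pv_insertAll_fresh _ _ hnd hfresh]
      rw [ih ds (by simpa using hlen) (fun i a' d' ha hd => h (i + 1) a' d' (by simpa using ha) (by simpa using hd))]
      rfl

-- the whole row loop, transposed: pvGo computes, per column, the fold of merge steps
theorem pv_go_eq (rows : List (List (List (String × String)))) (n : Nat)
    (accs : List (PySem.Dict String String))
    (hacc : accs.length = n) (hlen : ∀ r ∈ rows, r.length = n)
    (hdisj : ∀ k, k < n → ((accs.getD k PySem.Dict.empty).keys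
      ++ rows.flatMap (fun r => PySem.Set.ofList (((r.getD k []).map Prod.fst)))).Nodup) :
    pvGo n accs rows = some ((List.range n).map (fun k =>
      (rows.map (fun r => r.getD k [])).foldl pvMergeStep (accs.getD k PySem.Dict.empty))) := by
  induction rows generalizing accs with
  | nil =>
    rw [pvGo]
    congr 1
    apply List.ext_getElem
    · simp [hacc]
    · intro k h1 h2
      simp only [List.getElem_map, List.getElem_range, List.map_nil, List.foldl_nil]
      rw [List.getD_eq_getElem accs PySem.Dict.empty h1]
  | cons r rest ih =>
    rw [pvGo]
    have hr : r.length = n := hlen r (by simp)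
    rw [if_neg (by simp [hr])]
    have hfresh : ∀ (i : Nat) (a : PySem.Dict String String) (d : List (String × String)),
        accs[i]? = some a → r[i]? = some d → ∀ p ∈ d, a.contains p.1 = false := by
      intro i a d ha hd
      obtain ⟨hi, hae⟩ := List.getElem?_eq_some_iff.mp ha
      obtain ⟨hi', hde⟩ := List.getElem?_eq_some_iff.mp hd
      have hin : i < n := hacc ▸ hi
      have h1 := hdisj i hin
      simp only [List.flatMap_cons, ← List.append_assoc] at h1
      have hga : accs.getD i PySem.Dict.empty = a := by
        rw [List.getD_eq_getElem accs PySem.Dict.empty hi, hae]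
      have hgd : r.getD i [] = d := by
        rw [List.getD_eq_getElem r [] hi', hde]
      rw [hga, hgd] at h1
      apply pv_fresh_of_nodup a d
      rw [List.nodup_append] at h1
      exact h1.1
    rw [pv_mergeRow_eq accs r (by rw [hacc, hr]) hfresh]
    show pvGo n (List.zipWith pvMergeStep accs r) rest = _
    have hzl : (List.zipWith pvMergeStep accs r).length = n := by
      simp [List.length_zipWith, hacc, hr]
    have hget : ∀ k, k < n →
        (List.zipWith pvMergeStep accs r).getD k PySem.Dict.empty
          = pvMergeStep (accs.getD k PySem.Dict.empty) (r.getD k []) := by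
      intro k hk
      rw [List.getD_eq_getElem _ _ (by rw [hzl]; exact hk), List.getElem_zipWith,
        List.getD_eq_getElem accs PySem.Dict.empty (by rw [hacc]; exact hk),
        List.getD_eq_getElem r [] (by rw [hr]; exact hk)]
    have hnodupk : ∀ k, k < n →
        ((accs.getD k PySem.Dict.empty).keys ++ PySem.Set.ofList ((r.getD k []).map Prod.fst)).Nodup := by
      intro k hk
      have h1 := hdisj k hk
      simp only [List.flatMap_cons, ← List.append_assoc] at h1
      rw [List.nodup_append] at h1
      exact h1.1
    rw [ih (List.zipWith pvMergeStep accs r) hzl (fun r' hr' => hlen r' (by simp [hr']))]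
    · congr 1
      apply List.map_congr_left
      intro k hk
      rw [List.mem_range] at hk
      simp only [List.map_cons, List.foldl_cons]
      rw [hget k hk]
    · intro k hk
      rw [hget k hk, pv_mergeStep_keys _ _ (hnodupk k hk)]
      have h1 := hdisj k hk
      simp only [List.flatMap_cons, ← List.append_assoc] at h1
      rwa [List.append_assoc] at h1 ⊢
      
-- ===== VERDICT (by name: the statement is the Claim_ definition above) =====
theorem concat_dicts_spec : Claim_equal_concat_dicts := by
  intro l _hDom hPre
  unfold Spec_concat_dicts
  obtain ⟨hlen, hdisj⟩ := hPre
  by_cases hl : l = []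
  · subst hl; rfl
  have hE : l.isEmpty = false := by simpa [List.isEmpty_iff] using hl
  have hA : l.all (fun dicts => dicts.length == (l.headD []).length) = true := by
    simp only [List.all_eq_true, beq_iff_eq]
    exact hlen
  rw [concat_dicts, concat_dicts_alt, hE, hA]
  simp only [Bool.not_true, Bool.false_eq_true, if_false]
  have hinner : ∀ y : Int, (PySem.List.pyRange 0 (l.length : Int) 1).map
      (fun x => PySem.List.pyGetD (PySem.List.pyGetD l x []) y [])
      = l.map (fun row => PySem.List.pyGetD row y []) := by
    intro y
    have hbase := PySem.List.map_pyGetD_pyRange_zero' l ([] : List (List (String × String)))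
    calc (PySem.List.pyRange 0 (l.length : Int) 1).map
          (fun x => PySem.List.pyGetD (PySem.List.pyGetD l x []) y [])
        = ((PySem.List.pyRange 0 (l.length : Int) 1).map (fun x => PySem.List.pyGetD l x [])).map
            (fun row => PySem.List.pyGetD row y []) := by rw [List.map_map]; rfl
      _ = l.map (fun row => PySem.List.pyGetD row y []) := by rw [hbase]
  simp only [hinner]
  have hkeys : ∀ k, k < (l.headD []).length →
      ((l.map (fun row => row.getD k [])).flatMap
        (fun d => PySem.Set.ofList (d.map Prod.fst))).Nodup := by
    intro k hk
    have := hdisj k hk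
    simpa [PySem.List.dedup_eq_ofList, List.flatMap_map, Function.comp] using this
  have hrep : ∀ k, (List.replicate (l.headD []).length (PySem.Dict.empty : PySem.Dict String String)).getD k
      PySem.Dict.empty = PySem.Dict.empty := by
    intro k
    simp [List.getD_eq_getElem?_getD, List.getElem?_replicate]
    split_ifs <;> rfl
  have hd0 : ∀ k, k < (l.headD []).length →
      (((List.replicate (l.headD []).length (PySem.Dict.empty : PySem.Dict String String)).getD k
          PySem.Dict.empty).keys
        ++ l.flatMap (fun r => PySem.Set.ofList ((r.getD k []).map Prod.fst))).Nodup := by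
    intro k hk
    rw [hrep k]
    have he : (PySem.Dict.empty : PySem.Dict String String).keys = [] := rfl
    rw [he, List.nil_append]
    have := hdisj k hk
    simpa [PySem.List.dedup_eq_ofList] using this
  rw [pv_go_eq l (l.headD []).length (List.replicate (l.headD []).length PySem.Dict.empty)
    (by simp) hlen hd0]
  show _ = List.map PySem.Dict.items
      (List.map (fun k => List.foldl pvMergeStep
        ((List.replicate (l.headD []).length PySem.Dict.empty).getD k PySem.Dict.empty)
        (List.map (fun r => r.getD k []) l)) (List.range (l.headD []).length))
  rw [PySem.List.pyRange_zero_natCast, List.map_map, List.map_map]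
  apply List.map_congr_left
  intro k hk
  rw [List.mem_range] at hk
  simp only [Function.comp, PySem.List.pyGetD_natCast, hrep k]
  rw [pv_column_a _ (by simpa [List.flatMap_map, Function.comp] using hkeys k hk)]
  rw [pv_colfold _ PySem.Dict.empty (by
    have he : (PySem.Dict.empty : PySem.Dict String String).keys = [] := rfl
    rw [he, List.nil_append]
    simpa [List.flatMap_map, Function.comp] using hkeys k hk)]
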